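-- pv_equiv track=rewrite | github.com/NayanaChandrika99/RLM_aiObservability | agentica-server/src/inference/endpoint.py | _text_not_between
-- ===== SOURCE A (Python) =====
-- from typing import Any, Awaitable, Callable, Generator, Literal, cast
--
-- def _find_matching_end(text: str, start: str, end: str, pos: int) -> int:
--     """Find matching end tag position, handling nesting. Raises ValueError if not found."""
--     depth = 1
--     start_len, end_len = len(start), len(end)
--     while depth > 0:
--         next_start = text.find(start, pos)
--         next_end = text.index(end, pos)
--         # Prioritize start when: start comes first, OR they overlap and start is longer
--         # (handles case where end is prefix of start, like ``` vs ```python)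
--         if next_start != -1 and (
--             next_start < next_end or (next_start == next_end and start_len > end_len)
--         ):
--             depth += 1
--             pos = next_start + start_len
--         else:
--             depth -= 1
--             pos = next_end + end_len
--     return pos - end_len
--
-- def _text_not_between(text: str, start: str, end: str) -> Generator[str, None, None]:
--     start_len = len(start)
--     end_len = len(end)
--     ptr = 0
--     while True:
--         try:
--             start_pos = text.index(start, ptr)
--         except ValueError:
--             yield text[ptr:]  # No more starts, yield rest
--             break
--         # Check if matching end exists before yielding
--         try:
--             end_pos = _find_matching_end(text, start, end, start_pos + start_len)
--         except ValueError:
--             yield text[ptr:]  # Unmatched start, yield everything remaining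
--             break
--         yield text[ptr:start_pos]
--         ptr = end_pos + end_len
-- ===== SOURCE B (Python) =====
-- def _text_not_between(text: str, start: str, end: str):
--     # Precompute every occurrence position of start and of end once, then do a
--     # single merge walk over the two sorted position lists with monotone pointers.
--     n = len(text)
--     starts = [i for i in range(n + 1) if text.startswith(start, i)]
--     ends = [i for i in range(n + 1) if text.startswith(end, i)]
--     prio = len(start) > len(end)
--     si = ei = seg = tok = pos = depth = 0
--     while True:
--         if depth == 0:
--             while si < len(starts) and starts[si] < pos:
--                 si += 1
--             if si == len(starts):
--                 yield text[seg:]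
--                 return
--             tok = starts[si]
--             depth = 1
--             pos = starts[si] + len(start)
--         else:
--             while ei < len(ends) and ends[ei] < pos:
--                 ei += 1
--             if ei == len(ends):
--                 yield text[seg:]
--                 return
--             while si < len(starts) and starts[si] < pos:
--                 si += 1
--             if si < len(starts) and (starts[si] < ends[ei] or (starts[si] == ends[ei] and prio)):
--                 depth += 1
--                 pos = starts[si] + len(start)
--             else:
--                 depth -= 1
--                 pos = ends[ei] + len(end)
--                 if depth == 0:
--                     yield text[seg:tok]
--                     seg = pos
-- ===== Notes on version B (the rewrite author's own statement) =====
-- stated objective: alternative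
-- what changed: Instead of repeatedly scanning the text with find/index from a moving cursor (exception-driven helper + generator), B precomputes the sorted lists of all start and all end occurrence positions in one pass each and then runs a single merge walk over the two position lists with monotone pointers and a depth counter.
import Mathlib
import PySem

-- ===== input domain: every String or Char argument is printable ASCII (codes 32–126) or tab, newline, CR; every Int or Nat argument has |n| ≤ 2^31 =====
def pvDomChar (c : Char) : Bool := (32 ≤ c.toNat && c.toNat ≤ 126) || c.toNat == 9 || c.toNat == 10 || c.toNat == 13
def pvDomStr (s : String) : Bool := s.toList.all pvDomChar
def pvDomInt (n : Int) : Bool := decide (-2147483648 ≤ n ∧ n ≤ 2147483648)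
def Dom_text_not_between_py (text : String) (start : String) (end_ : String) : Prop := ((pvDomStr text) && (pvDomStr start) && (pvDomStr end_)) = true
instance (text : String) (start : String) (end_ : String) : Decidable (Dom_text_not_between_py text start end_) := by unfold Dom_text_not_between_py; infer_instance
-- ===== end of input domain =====

-- B replaces A's repeated find/index scans (exception-driven helper + generator) by two
-- precomputed sorted occurrence-position lists and a single merge walk over them;
-- equivalence of the yielded values is proved for every nonempty start delimiter.

-- ===== PORT A =====
-- _find_matching_end: `while depth > 0` ported with a fuel counter (the guard only makes the same
-- computation total; under Pre_ the fuel 2*len+3 is proved sufficient); `text.index` raising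
-- ValueError is `findFrom … = -1` mapped to `none`, which the caller's try/except observes.
def pvFmeA (text start end_ : List Char) : Nat → Nat → Nat → Option Nat
  | 0, _, _ => none
  | fuel+1, depth, pos =>
    if depth = 0 then some (pos - end_.length)
    else
      let nextStart := PySem.Chars.findFrom text start (pos : Int)
      let nextEnd := PySem.Chars.findFrom text end_ (pos : Int)
      if nextEnd = -1 then none
      else if nextStart ≠ -1 ∧ (nextStart < nextEnd ∨ (nextStart = nextEnd ∧ end_.length < start.length)) then
        pvFmeA text start end_ fuel (depth + 1) (nextStart.toNat + start.length)
      else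
        pvFmeA text start end_ fuel (depth - 1) (nextEnd.toNat + end_.length)

-- the generator's `while True` loop; `text.index(start, ptr)` raising = findFrom = -1
def pvLoopA (text start end_ : List Char) : Nat → Nat → List (List Char)
  | 0, _ => []
  | fuel+1, ptr =>
    let startPos := PySem.Chars.findFrom text start (ptr : Int)
    if startPos = -1 then [PySem.List.slice text (some (ptr : Int)) none]
    else
      match pvFmeA text start end_ (2 * text.length + 3) 1 (startPos.toNat + start.length) with
      | none => [PySem.List.slice text (some (ptr : Int)) none]
      | some endPos =>
          PySem.List.slice text (some (ptr : Int)) (some (startPos.toNat : Int)) ::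
          pvLoopA text start end_ fuel (endPos + end_.length)

def text_not_between_py (text : String) (start : String) (end_ : String) : List String :=
  (pvLoopA text.toList start.toList end_.toList (text.toList.length + 1) 0).map String.ofList

-- ===== PORT B =====
-- `[i for i in range(n+1) if text.startswith(start, i)]`; startswith(sub, i) for 0 ≤ i ≤ n is
-- exactly `sub.isPrefixOf (text.drop i)`.
def pvOccs (text sub : List Char) : List Nat :=
  (List.range (text.length + 1)).filter (fun i => sub.isPrefixOf (text.drop i))

-- B's single merge-walk loop; the monotone index pointers si/ei into the fixed occurrence lists
-- are ported as the remaining suffix lists ss/es, and the pointer-advancing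
-- `while p[i] < pos: i += 1` is exactly `List.dropWhile (· < pos)` on that suffix.
-- `while True` ported with fuel.
def pvLoopB (text start end_ : List Char) :
    Nat → List Nat → List Nat → Nat → Nat → Nat → Nat → List (List Char)
  | 0, _, _, _, _, _, _ => []
  | fuel+1, ss, es, seg, tok, pos, depth =>
    if depth = 0 then
      match ss.dropWhile (fun i => i < pos) with
      | [] => [PySem.List.slice text (some (seg : Int)) none]
      | s0 :: st =>
          pvLoopB text start end_ fuel (s0 :: st) es seg s0 (s0 + start.length) 1
    else
      match es.dropWhile (fun i => i < pos) with
      | [] => [PySem.List.slice text (some (seg : Int)) none]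
      | e0 :: et =>
        match ss.dropWhile (fun i => i < pos) with
        | s0 :: st =>
          if s0 < e0 ∨ (s0 = e0 ∧ end_.length < start.length) then
            pvLoopB text start end_ fuel (s0 :: st) (e0 :: et) seg tok (s0 + start.length) (depth + 1)
          else if depth - 1 = 0 then
            PySem.List.slice text (some (seg : Int)) (some (tok : Int)) ::
            pvLoopB text start end_ fuel (s0 :: st) (e0 :: et) (e0 + end_.length) tok (e0 + end_.length) 0
          else
            pvLoopB text start end_ fuel (s0 :: st) (e0 :: et) seg tok (e0 + end_.length) (depth - 1)
        | [] =>
          if depth - 1 = 0 then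
            PySem.List.slice text (some (seg : Int)) (some (tok : Int)) ::
            pvLoopB text start end_ fuel [] (e0 :: et) (e0 + end_.length) tok (e0 + end_.length) 0
          else
            pvLoopB text start end_ fuel [] (e0 :: et) seg tok (e0 + end_.length) (depth - 1)

def text_not_between_py_alt (text : String) (start : String) (end_ : String) : List String :=
  (pvLoopB text.toList start.toList end_.toList (2 * text.toList.length + 3)
      (pvOccs text.toList start.toList) (pvOccs text.toList end_.toList) 0 0 0 0).map String.ofList

-- ===== PRECONDITION & SPEC =====
-- Pre_ excludes an empty start delimiter: there both Python A and Python B can loop forever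
-- (e.g. text='ab', end='b'); on empty-start inputs where they do terminate they agree.
def Pre_text_not_between_py (text : String) (start : String) (end_ : String) : Prop := start ≠ ""
instance (text : String) (start : String) (end_ : String) : Decidable (Pre_text_not_between_py text start end_) := by unfold Pre_text_not_between_py; infer_instance

def pvWitness_text_not_between_py : String × String × String := ("a(b(c)d)e", "(", ")")

def Spec_text_not_between_py (text : String) (start : String) (end_ : String) (out : List String) : Prop := out = text_not_between_py_alt text start end_
instance (text : String) (start : String) (end_ : String) (out : List String) : Decidable (Spec_text_not_between_py text start end_ out) := by unfold Spec_text_not_between_py; infer_instance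

-- ===== CLAIM (what is proved, stated in full; the proofs are below) =====
def Claim_equal_text_not_between_py : Prop := ∀ (text : String) (start : String) (end_ : String), Dom_text_not_between_py text start end_ → Pre_text_not_between_py text start end_ → Spec_text_not_between_py text start end_ (text_not_between_py text start end_)

-- ===== LEMMAS AND PROOFS =====

-- canonical form of B's occurrence-suffix state: everything ≥ a
def pvF (text sub : List Char) (a : Nat) : List Nat :=
  (pvOccs text sub).filter (fun i => a ≤ i)

lemma pvOccs_pairwise (text sub : List Char) : (pvOccs text sub).Pairwise (· < ·) :=
  List.Pairwise.filter _ List.pairwise_lt_range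

-- on a strictly increasing list, dropping the prefix < pos is filtering by ≥ pos
lemma pvDropWhile_sorted (l : List Nat) (pos : Nat) (h : l.Pairwise (· < ·)) :
    l.dropWhile (fun i => i < pos) = l.filter (fun i => pos ≤ i) := by
  induction l with
  | nil => rfl
  | cons x t ih =>
    rw [List.pairwise_cons] at h
    rw [List.dropWhile_cons, List.filter_cons]
    by_cases hx : x < pos
    · simp only [hx, decide_true, if_true, show (decide (pos ≤ x)) = false by simp; omega,
        Bool.false_eq_true, if_false]
      exact ih h.2
    · simp only [hx, decide_false, Bool.false_eq_true, if_false,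
        show (decide (pos ≤ x)) = true by simp; omega, if_true]
      rw [List.filter_eq_self.mpr]
      intro y hy
      have := h.1 y hy
      simp only [decide_eq_true_eq]; omega

lemma pvF_drop (text sub : List Char) (a pos : Nat) (ha : a ≤ pos) :
    (pvF text sub a).dropWhile (fun i => i < pos) = pvF text sub pos := by
  unfold pvF
  rw [pvDropWhile_sorted _ _ (List.Pairwise.filter _ (pvOccs_pairwise text sub)),
    List.filter_filter]
  apply List.filter_congr
  intro x _
  by_cases hx : pos ≤ x <;> simp [hx] <;> omega

-- facts about a successful text.find(sub, pos): the hit is ≥ pos and the match fits inside text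
lemma pvFind_facts (text sub : List Char) (pos : Nat) (hp : pos ≤ text.length)
    (h : PySem.Chars.findFrom text sub (pos : Int) ≠ -1) :
    pos ≤ (PySem.Chars.findFrom text sub (pos : Int)).toNat ∧
    (PySem.Chars.findFrom text sub (pos : Int)).toNat + sub.length ≤ text.length := by
  obtain ⟨h1, h2, h3⟩ := PySem.Chars.findFrom_natCast_spec text sub pos hp h
  set r := PySem.Chars.findFrom text sub (pos : Int) with hr
  have hpos : pos ≤ r.toNat := by omega
  refine ⟨hpos, ?_⟩
  have hlen : sub.length ≤ (List.drop r.toNat text).length := h2.length_le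
  rw [List.length_drop] at hlen
  by_cases hle : r.toNat ≤ text.length
  · omega
  · have hsub : sub = [] := by
      have : sub.length = 0 := by omega
      exact List.eq_nil_of_length_eq_zero this
    by_cases hlt : pos < r.toNat
    · exact absurd (by simp [hsub]) (h3 pos le_rfl hlt)
    · omega

-- head of filter over a contiguous range, given the least satisfying element
lemma pvHeadFilterRange' (g : Nat → Bool) :
    ∀ (len a r : Nat), a ≤ r → r < a + len → g r = true →
      (∀ i, a ≤ i → i < r → g i = false) →
      ((List.range' a len).filter g).head? = some r := by
  intro len
  induction len with
  | zero => intro a r h1 h2 _ _; omega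
  | succ len ih =>
    intro a r h1 h2 hg hmin
    rw [List.range'_succ, List.filter_cons]
    by_cases har : a = r
    · subst har
      rw [if_pos hg]
      rfl
    · rw [if_neg (by simp [hmin a le_rfl (by omega)])]
      exact ih (a+1) r (by omega) (by omega) hg (fun i hi hir => hmin i (by omega) hir)

-- head of the ≥ pos occurrence suffix = text.find(sub, pos)
lemma pvOccHead (text sub : List Char) (pos : Nat) (hp : pos ≤ text.length) :
    (pvF text sub pos).head? =
      if PySem.Chars.findFrom text sub (pos : Int) = -1 then none
      else some (PySem.Chars.findFrom text sub (pos : Int)).toNat := by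
  unfold pvF pvOccs
  rw [List.filter_filter]
  by_cases hf : PySem.Chars.findFrom text sub (pos : Int) = -1
  · rw [if_pos hf]
    rw [List.head?_eq_none_iff, List.filter_eq_nil_iff]
    intro i hi
    rw [List.mem_range] at hi
    simp only [Bool.and_eq_true, decide_eq_true_eq]
    rintro ⟨hpi, hpref⟩
    have hinf : sub <:+: text.drop pos := by
      have hdd : (text.drop pos).drop (i - pos) = text.drop i := by
        rw [List.drop_drop]
        congr 1
        omega
      have hpre : sub <+: (text.drop pos).drop (i - pos) := by
        rw [hdd]; exact (PySem.Chars.startswith_iff _ _).mp hpref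
      exact hpre.isInfix.trans (List.drop_suffix _ _).isInfix
    exact ((PySem.Chars.findFrom_natCast_eq_neg_one_iff text sub pos hp).mp hf) hinf
  · rw [if_neg hf]
    obtain ⟨h1, h2, h3⟩ := PySem.Chars.findFrom_natCast_spec text sub pos hp hf
    obtain ⟨hge, hfit⟩ := pvFind_facts text sub pos hp hf
    set r := (PySem.Chars.findFrom text sub (pos : Int)).toNat with hr
    rw [List.range_eq_range']
    apply pvHeadFilterRange'
    · omega
    · omega
    · simp only [Bool.and_eq_true, decide_eq_true_eq]
      exact ⟨hge, (PySem.Chars.startswith_iff _ _).mpr h2⟩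
    · intro i _ hir
      by_cases hpi : pos ≤ i
      · have hnp : ¬ sub <+: text.drop i := h3 i hpi (by omega)
        have : sub.isPrefixOf (text.drop i) = false := by
          rw [← Bool.not_eq_true]
          intro hB
          exact hnp ((PySem.Chars.startswith_iff _ _).mp hB)
        simp [hpi, this]
      · simp [hpi]

-- one step of B's loop, phrased through find results (the translation between B's list heads
-- and A's find calls happens once, here)
lemma pvStepB (text start end_ : List Char) (f a b seg tok pos depth : Nat)
    (ha : a ≤ pos) (hb : b ≤ pos) (hp : pos ≤ text.length) :
    pvLoopB text start end_ (f+1) (pvF text start a) (pvF text end_ b) seg tok pos depth =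
      (if depth = 0 then
        if PySem.Chars.findFrom text start (pos : Int) = -1 then
          [PySem.List.slice text (some (seg : Int)) none]
        else
          pvLoopB text start end_ f (pvF text start pos) (pvF text end_ b) seg
            (PySem.Chars.findFrom text start (pos : Int)).toNat
            ((PySem.Chars.findFrom text start (pos : Int)).toNat + start.length) 1
      else
        if PySem.Chars.findFrom text end_ (pos : Int) = -1 then
          [PySem.List.slice text (some (seg : Int)) none]
        else if PySem.Chars.findFrom text start (pos : Int) ≠ -1 ∧ (PySem.Chars.findFrom text start (pos : Int) < PySem.Chars.findFrom text end_ (pos : Int) ∨ (PySem.Chars.findFrom text start (pos : Int) = PySem.Chars.findFrom text end_ (pos : Int) ∧ end_.length < start.length)) then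
          pvLoopB text start end_ f (pvF text start pos) (pvF text end_ pos) seg tok
            ((PySem.Chars.findFrom text start (pos : Int)).toNat + start.length) (depth + 1)
        else if depth - 1 = 0 then
          PySem.List.slice text (some (seg : Int)) (some (tok : Int)) ::
          pvLoopB text start end_ f (pvF text start pos) (pvF text end_ pos)
            ((PySem.Chars.findFrom text end_ (pos : Int)).toNat + end_.length) tok
            ((PySem.Chars.findFrom text end_ (pos : Int)).toNat + end_.length) 0
        else
          pvLoopB text start end_ f (pvF text start pos) (pvF text end_ pos) seg tok
            ((PySem.Chars.findFrom text end_ (pos : Int)).toNat + end_.length) (depth - 1)) := by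
  have hdS : (pvF text start a).dropWhile (fun i => i < pos) = pvF text start pos :=
    pvF_drop text start a pos ha
  have hdE : (pvF text end_ b).dropWhile (fun i => i < pos) = pvF text end_ pos :=
    pvF_drop text end_ b pos hb
  have hhS := pvOccHead text start pos hp
  have hhE := pvOccHead text end_ pos hp
  rw [pvLoopB]
  by_cases hd : depth = 0
  · rw [if_pos hd, if_pos hd, hdS]
    by_cases hf : PySem.Chars.findFrom text start (pos : Int) = -1
    · rw [if_pos hf] at hhS
      rw [List.head?_eq_none_iff.mp hhS, if_pos hf]
    · rw [if_neg hf] at hhS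
      obtain ⟨st, hL⟩ := List.head?_eq_some_iff.mp hhS
      rw [hL, if_neg hf]
  · rw [if_neg hd, if_neg hd, hdE, hdS]
    by_cases he : PySem.Chars.findFrom text end_ (pos : Int) = -1
    · rw [if_pos he] at hhE
      rw [List.head?_eq_none_iff.mp hhE, if_pos he]
    · rw [if_neg he] at hhE
      obtain ⟨et, hLE⟩ := List.head?_eq_some_iff.mp hhE
      obtain ⟨h1E, _, _⟩ := PySem.Chars.findFrom_natCast_spec text end_ pos hp he
      have hiE : (((PySem.Chars.findFrom text end_ (pos : Int)).toNat : Nat) : Int) = PySem.Chars.findFrom text end_ (pos : Int) :=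
        Int.toNat_of_nonneg (le_trans (Int.natCast_nonneg pos) h1E)
      rw [hLE, if_neg he]
      by_cases hf : PySem.Chars.findFrom text start (pos : Int) = -1
      · rw [if_pos hf] at hhS
        have hL : pvF text start pos = [] := List.head?_eq_none_iff.mp hhS
        rw [hL, if_neg (by simp [hf])]
      · rw [if_neg hf] at hhS
        obtain ⟨st, hL⟩ := List.head?_eq_some_iff.mp hhS
        obtain ⟨h1S, _, _⟩ := PySem.Chars.findFrom_natCast_spec text start pos hp hf
        have hiS : (((PySem.Chars.findFrom text start (pos : Int)).toNat : Nat) : Int) = PySem.Chars.findFrom text start (pos : Int) :=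
          Int.toNat_of_nonneg (le_trans (Int.natCast_nonneg pos) h1S)
        rw [hL]
        by_cases hc : (PySem.Chars.findFrom text start (pos : Int)).toNat < (PySem.Chars.findFrom text end_ (pos : Int)).toNat ∨ ((PySem.Chars.findFrom text start (pos : Int)).toNat = (PySem.Chars.findFrom text end_ (pos : Int)).toNat ∧ end_.length < start.length)
        · have hcc : PySem.Chars.findFrom text start (pos : Int) ≠ -1 ∧ (PySem.Chars.findFrom text start (pos : Int) < PySem.Chars.findFrom text end_ (pos : Int) ∨ (PySem.Chars.findFrom text start (pos : Int) = PySem.Chars.findFrom text end_ (pos : Int) ∧ end_.length < start.length)) := by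
            refine ⟨hf, ?_⟩
            rcases hc with h | ⟨h, hl⟩
            · left; rw [← hiS, ← hiE]; exact_mod_cast h
            · right; rw [← hiS, ← hiE]; exact ⟨by exact_mod_cast h, hl⟩
          simp only []
          rw [if_pos hc, if_pos hcc]
        · have hncc : ¬ (PySem.Chars.findFrom text start (pos : Int) ≠ -1 ∧ (PySem.Chars.findFrom text start (pos : Int) < PySem.Chars.findFrom text end_ (pos : Int) ∨ (PySem.Chars.findFrom text start (pos : Int) = PySem.Chars.findFrom text end_ (pos : Int) ∧ end_.length < start.length))) := by
            rintro ⟨-, h | ⟨h, hl⟩⟩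
            · exact hc (Or.inl (by rw [← hiS, ← hiE] at h; exact_mod_cast h))
            · exact hc (Or.inr ⟨by rw [← hiS, ← hiE] at h; exact_mod_cast h, hl⟩)
          simp only []
          rw [if_neg hc, if_neg hncc]

-- one-step unfolding equations of A's port (lets expanded)
lemma pvFmeA_succ (text start end_ : List Char) (fuel depth pos : Nat) :
    pvFmeA text start end_ (fuel+1) depth pos =
      (if depth = 0 then some (pos - end_.length)
       else
        if PySem.Chars.findFrom text end_ (pos : Int) = -1 then none
        else if PySem.Chars.findFrom text start (pos : Int) ≠ -1 ∧ (PySem.Chars.findFrom text start (pos : Int) < PySem.Chars.findFrom text end_ (pos : Int) ∨ (PySem.Chars.findFrom text start (pos : Int) = PySem.Chars.findFrom text end_ (pos : Int) ∧ end_.length < start.length)) then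
          pvFmeA text start end_ fuel (depth + 1) ((PySem.Chars.findFrom text start (pos : Int)).toNat + start.length)
        else
          pvFmeA text start end_ fuel (depth - 1) ((PySem.Chars.findFrom text end_ (pos : Int)).toNat + end_.length)) := by
  rw [pvFmeA]

lemma pvLoopA_succ (text start end_ : List Char) (fuel ptr : Nat) :
    pvLoopA text start end_ (fuel+1) ptr =
      (if PySem.Chars.findFrom text start (ptr : Int) = -1 then [PySem.List.slice text (some (ptr : Int)) none]
       else
        match pvFmeA text start end_ (2 * text.length + 3) 1 ((PySem.Chars.findFrom text start (ptr : Int)).toNat + start.length) with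
        | none => [PySem.List.slice text (some (ptr : Int)) none]
        | some endPos =>
            PySem.List.slice text (some (ptr : Int)) (some (((PySem.Chars.findFrom text start (ptr : Int)).toNat : Nat) : Int)) ::
            pvLoopA text start end_ fuel (endPos + end_.length)) := by
  rw [pvLoopA]

-- B's result only depends on the occurrence-suffix states through their ≥ pos part
lemma pvLoopB_norm (text start end_ : List Char) :
    ∀ f a b a' b' seg tok pos depth, a ≤ pos → b ≤ pos → a' ≤ pos → b' ≤ pos → pos ≤ text.length →
      pvLoopB text start end_ f (pvF text start a) (pvF text end_ b) seg tok pos depth =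
      pvLoopB text start end_ f (pvF text start a') (pvF text end_ b') seg tok pos depth := by
  intro f
  induction f with
  | zero => intros; rfl
  | succ f ih =>
    intro a b a' b' seg tok pos d ha hb ha' hb' hp
    rw [pvStepB text start end_ f a b seg tok pos d ha hb hp,
        pvStepB text start end_ f a' b' seg tok pos d ha' hb' hp]
    by_cases hd : d = 0
    · rw [if_pos hd, if_pos hd]
      by_cases hf : PySem.Chars.findFrom text start (pos : Int) = -1
      · rw [if_pos hf, if_pos hf]
      · rw [if_neg hf, if_neg hf]
        obtain ⟨hge, hfit⟩ := pvFind_facts text start pos hp hf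
        exact ih pos b pos b' seg _ _ 1 (by omega) (by omega) (by omega) (by omega) (by omega)
    · rw [if_neg hd, if_neg hd]

lemma pvLoopB_mono (text start end_ : List Char) (hs : start ≠ []) :
    ∀ f seg tok pos depth, pos ≤ text.length →
      2 * (text.length - pos) + depth + 1 ≤ f →
      pvLoopB text start end_ (f+1) (pvF text start pos) (pvF text end_ pos) seg tok pos depth =
      pvLoopB text start end_ f (pvF text start pos) (pvF text end_ pos) seg tok pos depth := by
  intro f
  induction f with
  | zero => intro seg tok pos d _ hm; omega
  | succ f ih =>
    intro seg tok pos d hp hm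
    have hsl : 1 ≤ start.length := List.length_pos_iff.mpr hs
    rw [pvStepB text start end_ (f+1) pos pos seg tok pos d le_rfl le_rfl hp,
        pvStepB text start end_ f pos pos seg tok pos d le_rfl le_rfl hp]
    by_cases hd : d = 0
    · rw [if_pos hd, if_pos hd]
      by_cases hf : PySem.Chars.findFrom text start (pos : Int) = -1
      · rw [if_pos hf, if_pos hf]
      · rw [if_neg hf, if_neg hf]
        obtain ⟨hge, hfit⟩ := pvFind_facts text start pos hp hf
        rw [pvLoopB_norm text start end_ (f+1) pos pos _ _ seg _ _ 1
              (by omega) (by omega) (le_refl _) (le_refl _) (by omega),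
           pvLoopB_norm text start end_ f pos pos _ _ seg _ _ 1
              (by omega) (by omega) (le_refl _) (le_refl _) (by omega)]
        exact ih seg _ _ 1 (by omega) (by omega)
    · rw [if_neg hd, if_neg hd]
      by_cases he : PySem.Chars.findFrom text end_ (pos : Int) = -1
      · rw [if_pos he, if_pos he]
      · rw [if_neg he, if_neg he]
        obtain ⟨hje, hfe⟩ := pvFind_facts text end_ pos hp he
        by_cases hc : PySem.Chars.findFrom text start (pos : Int) ≠ -1 ∧ (PySem.Chars.findFrom text start (pos : Int) < PySem.Chars.findFrom text end_ (pos : Int) ∨ (PySem.Chars.findFrom text start (pos : Int) = PySem.Chars.findFrom text end_ (pos : Int) ∧ end_.length < start.length))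
        · rw [if_pos hc, if_pos hc]
          obtain ⟨hgi, hfi⟩ := pvFind_facts text start pos hp hc.1
          rw [pvLoopB_norm text start end_ (f+1) pos pos _ _ seg tok _ (d+1)
                (by omega) (by omega) (le_refl _) (le_refl _) (by omega),
             pvLoopB_norm text start end_ f pos pos _ _ seg tok _ (d+1)
                (by omega) (by omega) (le_refl _) (le_refl _) (by omega)]
          exact ih seg tok _ (d+1) (by omega) (by omega)
        · rw [if_neg hc, if_neg hc]
          by_cases hone : d - 1 = 0
          · rw [if_pos hone, if_pos hone]
            rw [pvLoopB_norm text start end_ (f+1) pos pos _ _ _ tok _ 0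
                  (by omega) (by omega) (le_refl _) (le_refl _) (by omega),
               pvLoopB_norm text start end_ f pos pos _ _ _ tok _ 0
                  (by omega) (by omega) (le_refl _) (le_refl _) (by omega)]
            rw [ih _ tok _ 0 (by omega) (by omega)]
          · rw [if_neg hone, if_neg hone]
            rw [pvLoopB_norm text start end_ (f+1) pos pos _ _ seg tok _ (d-1)
                  (by omega) (by omega) (le_refl _) (le_refl _) (by omega),
               pvLoopB_norm text start end_ f pos pos _ _ seg tok _ (d-1)
                  (by omega) (by omega) (le_refl _) (le_refl _) (by omega)]
            exact ih seg tok _ (d-1) (by omega) (by omega)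

lemma pvLoopB_suff (text start end_ : List Char) (hs : start ≠ []) :
    ∀ f g seg tok pos depth, pos ≤ text.length →
      2 * (text.length - pos) + depth + 1 ≤ f → 2 * (text.length - pos) + depth + 1 ≤ g →
      pvLoopB text start end_ f (pvF text start pos) (pvF text end_ pos) seg tok pos depth =
      pvLoopB text start end_ g (pvF text start pos) (pvF text end_ pos) seg tok pos depth := by
  intro f g seg tok pos d hp hf hg
  have H : ∀ k, 2 * (text.length - pos) + d + 1 ≤ k →
      pvLoopB text start end_ k (pvF text start pos) (pvF text end_ pos) seg tok pos d =
      pvLoopB text start end_ (2 * (text.length - pos) + d + 1) (pvF text start pos) (pvF text end_ pos) seg tok pos d := by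
    intro k hk
    induction k, hk using Nat.le_induction with
    | base => rfl
    | succ k hk ihk => rw [pvLoopB_mono text start end_ hs k seg tok pos d hp hk, ihk]
  rw [H f hf, H g hg]

-- a successful _find_matching_end returns inside the text, past its starting position
lemma pvFme_bounds (text start end_ : List Char) :
    ∀ fuel depth pos r, 1 ≤ depth → pos ≤ text.length →
      pvFmeA text start end_ fuel depth pos = some r →
      pos ≤ r + end_.length ∧ r + end_.length ≤ text.length := by
  intro fuel
  induction fuel with
  | zero => intro depth pos r _ _ h; simp [pvFmeA] at h
  | succ fuel ih =>
    intro depth pos r hd hp h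
    rw [pvFmeA] at h
    rw [if_neg (by omega)] at h
    by_cases hje : PySem.Chars.findFrom text end_ (pos : Int) = -1
    · simp only [hje, if_pos] at h; exact absurd h (by simp)
    · rw [if_neg hje] at h
      obtain ⟨hj1, hj2⟩ := pvFind_facts text end_ pos hp hje
      split_ifs at h with hc
      · obtain ⟨hi, _⟩ := hc
        obtain ⟨hi1, hi2⟩ := pvFind_facts text start pos hp hi
        have := ih (depth + 1) _ r (by omega) (by omega) h
        omega
      · by_cases hd1 : depth = 1
        · subst hd1
          rcases fuel with _ | fuel
          · simp [pvFmeA] at h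
          · rw [pvFmeA, if_pos rfl] at h
            have hr := Option.some.inj h
            omega
        · have := ih (depth - 1) _ r (by omega) (by omega) h
          omega

-- B's depth>0 phase simulates _find_matching_end
lemma pvInner (text start end_ : List Char) (hs : start ≠ []) :
    ∀ fA depth pos seg tok, 1 ≤ depth → pos ≤ text.length →
      2 * (text.length - pos) + depth + 1 ≤ fA →
      2 * (text.length - pos) + depth + 1 ≤ 2 * text.length →
      pvLoopB text start end_ (2 * text.length + 3) (pvF text start pos) (pvF text end_ pos) seg tok pos depth =
        (match pvFmeA text start end_ fA depth pos with
          | none => [PySem.List.slice text (some (seg : Int)) none]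
          | some r => PySem.List.slice text (some (seg : Int)) (some (tok : Int)) ::
              pvLoopB text start end_ (2 * text.length + 3) (pvF text start (r + end_.length)) (pvF text end_ (r + end_.length)) (r + end_.length) tok (r + end_.length) 0) := by
  intro fA
  induction fA with
  | zero => intro d pos seg tok hd hp hfa hM; omega
  | succ fA ih =>
    intro d pos seg tok hd hp hfa hM
    have hsl : 1 ≤ start.length := List.length_pos_iff.mpr hs
    rw [pvFmeA_succ, if_neg (by omega)]
    rw [show 2 * text.length + 3 = (2 * text.length + 2) + 1 from rfl,
        pvStepB text start end_ (2 * text.length + 2) pos pos seg tok pos d le_rfl le_rfl hp,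
        if_neg (by omega)]
    by_cases hj : PySem.Chars.findFrom text end_ (pos : Int) = -1
    · rw [if_pos hj, if_pos hj]
    · rw [if_neg hj, if_neg hj]
      have hjf := pvFind_facts text end_ pos hp hj
      by_cases hc : PySem.Chars.findFrom text start (pos : Int) ≠ -1 ∧ (PySem.Chars.findFrom text start (pos : Int) < PySem.Chars.findFrom text end_ (pos : Int) ∨ (PySem.Chars.findFrom text start (pos : Int) = PySem.Chars.findFrom text end_ (pos : Int) ∧ end_.length < start.length))
      · rw [if_pos hc, if_pos hc]
        have hif := pvFind_facts text start pos hp hc.1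
        rw [pvLoopB_norm text start end_ (2 * text.length + 2) pos pos _ _ seg tok _ (d+1)
              (by omega) (by omega) (le_refl _) (le_refl _) (by omega),
           pvLoopB_suff text start end_ hs (2 * text.length + 2) (2 * text.length + 3) seg tok
              _ (d + 1) (by omega) (by omega) (by omega)]
        exact ih (d + 1) _ seg tok (by omega) (by omega) (by omega) (by omega)
      · rw [if_neg hc, if_neg hc]
        by_cases hd1 : d = 1
        · subst hd1
          rw [if_pos rfl]
          rcases fA with _ | fA
          · omega
          · rw [pvFmeA_succ, if_pos rfl]
            rw [pvLoopB_norm text start end_ (2 * text.length + 2) pos pos _ _ _ tok _ 0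
                  (by omega) (by omega) (le_refl _) (le_refl _) (by omega),
               pvLoopB_suff text start end_ hs (2 * text.length + 2) (2 * text.length + 3) _ tok
                  _ 0 (by omega) (by omega) (by omega),
               show (PySem.Chars.findFrom text end_ (pos : Int)).toNat + end_.length - end_.length
                  = (PySem.Chars.findFrom text end_ (pos : Int)).toNat from by omega]
        · rw [if_neg (by omega)]
          rw [pvLoopB_norm text start end_ (2 * text.length + 2) pos pos _ _ seg tok _ (d-1)
                (by omega) (by omega) (le_refl _) (le_refl _) (by omega),
             pvLoopB_suff text start end_ hs (2 * text.length + 2) (2 * text.length + 3) seg tok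
                _ (d - 1) (by omega) (by omega) (by omega)]
          exact ih (d - 1) _ seg tok (by omega) (by omega) (by omega) (by omega)

-- B's depth=0 phase simulates the generator's outer loop
lemma pvOuter (text start end_ : List Char) (hs : start ≠ []) :
    ∀ fO ptr tok, ptr ≤ text.length → text.length - ptr + 1 ≤ fO →
      pvLoopA text start end_ fO ptr =
      pvLoopB text start end_ (2 * text.length + 3) (pvF text start ptr) (pvF text end_ ptr) ptr tok ptr 0 := by
  intro fO
  induction fO with
  | zero => intro ptr tok _ hf; omega
  | succ fO ih =>
    intro ptr tok hp hf
    have hsl : 1 ≤ start.length := List.length_pos_iff.mpr hs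
    rw [pvLoopA_succ]
    rw [show 2 * text.length + 3 = (2 * text.length + 2) + 1 from rfl,
        pvStepB text start end_ (2 * text.length + 2) ptr ptr ptr tok ptr 0 le_rfl le_rfl hp,
        if_pos rfl]
    by_cases hi : PySem.Chars.findFrom text start (ptr : Int) = -1
    · rw [if_pos hi, if_pos hi]
    · rw [if_neg hi, if_neg hi]
      have hif := pvFind_facts text start ptr hp hi
      rw [pvLoopB_norm text start end_ (2 * text.length + 2) ptr ptr _ _ ptr _ _ 1
            (by omega) (by omega) (le_refl _) (le_refl _) (by omega),
         pvLoopB_suff text start end_ hs (2 * text.length + 2) (2 * text.length + 3) ptr _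
            _ 1 (by omega) (by omega) (by omega)]
      rw [pvInner text start end_ hs (2 * text.length + 3) 1
            ((PySem.Chars.findFrom text start (ptr : Int)).toNat + start.length) ptr
            (PySem.Chars.findFrom text start (ptr : Int)).toNat le_rfl (by omega) (by omega) (by omega)]
      rcases hfme : pvFmeA text start end_ (2 * text.length + 3) 1
          ((PySem.Chars.findFrom text start (ptr : Int)).toNat + start.length) with _ | r
      · rfl
      · have hb := pvFme_bounds text start end_ (2 * text.length + 3) 1
          ((PySem.Chars.findFrom text start (ptr : Int)).toNat + start.length) r le_rfl (by omega) hfme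
        have := ih (r + end_.length) (PySem.Chars.findFrom text start (ptr : Int)).toNat
          (by omega) (by omega)
        simp only [this]

lemma pvF_zero (text sub : List Char) : pvF text sub 0 = pvOccs text sub :=
  List.filter_eq_self.mpr (by simp)

-- ===== VERDICT (by name: the statement is the Claim_ definition above) =====
theorem text_not_between_py_spec : Claim_equal_text_not_between_py := by
  intro text start end_ _ hpre
  unfold Spec_text_not_between_py text_not_between_py text_not_between_py_alt
  have hs : start.toList ≠ [] := by
    intro h
    exact hpre (by simpa using congrArg String.ofList h)
  rw [pvOuter text.toList start.toList end_.toList hs (text.toList.length + 1) 0 0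
    (Nat.zero_le _) (by omega), pvF_zero, pvF_zero]
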